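-- pv_equiv track=rewrite | github.com/michaelfromyeg/aoc23 | day12/day12.py | _get_arrangements
-- ===== SOURCE A (Python) =====
-- def _get_arrangements(record: str, count: int, last_replaced: int = -1) -> list[str]:
--     """
--     Get all possible arrangements.
--
--     It'd be nice if this wasn't recursive. Also, we could check validate in the base case...
--     """
--     if count == 0:
--         return [record.replace("?", ".")]
--
--     records = []
--     for i in range(last_replaced + 1, len(record), 1):
--         if record[i] == "?":
--             new_record = record[:i] + "#" + record[i + 1 :]
--             records.extend(_get_arrangements(new_record, count - 1, i))
--
--     return records
-- ===== SOURCE B (Python) =====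
-- def _combos(n, xs):
--     if n == 0:
--         return [()]
--     if not xs:
--         return []
--     head, rest = xs[0], xs[1:]
--     return [(head,) + c for c in _combos(n - 1, rest)] + _combos(n, rest)
--
--
-- def _get_arrangements(record: str, count: int, last_replaced: int = -1) -> list[str]:
--     if count < 0:
--         return []
--     qs = [i for i in range(len(record)) if record[i] == "?" and i > last_replaced]
--     out = []
--     for combo in _combos(count, qs):
--         chosen = set(combo)
--         out.append("".join("#" if i in chosen else ("." if c == "?" else c)
--                            for i, c in enumerate(record)))
--     return out
-- ===== Notes on version B (the rewrite author's own statement) =====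
-- stated objective: idiomatic
-- what changed: Replaces the position-by-position recursive expansion (which rebuilds a new string at every chosen '?' and recurses) by a flat pass: collect the eligible '?' indices once, enumerate the index combinations in lexicographic order, and render each arrangement directly from the original record.
-- outside the precondition, e.g. on _get_arrangements('?', 1, -2): A returns ['#.', '#'], B returns ['#']; on _get_arrangements('a?', 1, -3): A returns ['a#a.', 'a#'], B returns ['a#']; on _get_arrangements('', 1, -2): A raises IndexError, B returns []
import Mathlib
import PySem

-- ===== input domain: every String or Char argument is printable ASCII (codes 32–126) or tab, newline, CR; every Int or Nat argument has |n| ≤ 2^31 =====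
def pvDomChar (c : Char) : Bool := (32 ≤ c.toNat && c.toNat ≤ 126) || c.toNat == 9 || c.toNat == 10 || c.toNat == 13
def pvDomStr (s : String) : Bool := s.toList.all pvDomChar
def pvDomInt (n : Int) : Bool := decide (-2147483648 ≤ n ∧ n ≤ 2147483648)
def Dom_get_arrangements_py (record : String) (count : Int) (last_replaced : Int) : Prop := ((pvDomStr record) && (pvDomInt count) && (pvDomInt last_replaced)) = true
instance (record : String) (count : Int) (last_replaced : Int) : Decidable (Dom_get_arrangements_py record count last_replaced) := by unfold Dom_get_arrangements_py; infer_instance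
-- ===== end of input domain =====

-- B enumerates the eligible '?'-index combinations in one flat pass instead of A's
-- recursive string-rebuilding expansion (objective: idiomatic); equivalence is claimed
-- for last_replaced ≥ -1 (or count = 0), see Pre_ below.

-- ===== PORT A =====
-- record.replace("?", ".") applied characterwise
def pvDot (c : Char) : Char := if c = '?' then '.' else c

-- record[:i] + "#" + record[i+1:]
def pvSetHash (l : List Char) (i : Int) : List Char :=
  PySem.List.slice l none (some i) ++ ['#'] ++ PySem.List.slice l (some (i + 1)) none

-- the recursion of _get_arrangements, on List Char; fuel (≥ number of '?' + 1, supplied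
-- at the call site as length+1) only makes the recursion structural and is never exhausted
def pvAGo : Nat → List Char → Int → Int → List (List Char)
  | 0, _, _, _ => []
  | fuel + 1, l, count, last =>
    if count = 0 then [l.map pvDot]
    else
      (PySem.List.pyRange (last + 1) (l.length : Int) 1).foldl
        (fun acc i =>
          if PySem.List.pyGet? l i == some '?' then
            acc ++ pvAGo fuel (pvSetHash l i) (count - 1) i
          else acc) []

def get_arrangements_py (record : String) (count : Int) (last_replaced : Int) : List String :=
  (pvAGo (record.toList.length + 1) record.toList count last_replaced).map String.mk

-- ===== PORT B =====
-- _combos(n, xs): all length-n index combinations, lexicographic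
def pvCombos : Nat → List Nat → List (List Nat)
  | 0, _ => [[]]
  | _ + 1, [] => []
  | n + 1, x :: xs => (pvCombos n xs).map (fun c => x :: c) ++ pvCombos (n + 1) xs

-- qs = [i for i in range(len(record)) if record[i] == '?' and i > last_replaced]
def pvQs (l : List Char) (last : Int) : List Nat :=
  (List.range l.length).filter (fun i => l.getD i ' ' == '?' && decide (last < (i : Int)))

-- ''.join('#' if i in chosen else ('.' if c == '?' else c) for i, c in enumerate(record))
def pvBuild (l : List Char) (combo : List Nat) : List Char :=
  l.mapIdx (fun i c => if i ∈ combo then '#' else if c = '?' then '.' else c)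

def get_arrangements_py_alt (record : String) (count : Int) (last_replaced : Int) : List String :=
  if count < 0 then []
  else
    (pvCombos count.toNat (pvQs record.toList last_replaced)).map
      (fun combo => String.mk (pvBuild record.toList combo))

-- ===== PRECONDITION & SPEC =====
-- Pre_ excludes last_replaced < -1 with count ≠ 0: there Python's negative-index
-- wraparound makes A scan positions counted from the END of the record (returning
-- accidental arrangements, some even longer than the record) and raise IndexError
-- below -len(record)-1; B treats last_replaced as a plain lower bound.
def Pre_get_arrangements_py (record : String) (count : Int) (last_replaced : Int) : Prop :=
  -1 ≤ last_replaced ∨ count = 0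
instance (record : String) (count : Int) (last_replaced : Int) : Decidable (Pre_get_arrangements_py record count last_replaced) := by unfold Pre_get_arrangements_py; infer_instance

def pvWitness_get_arrangements_py : String × Int × Int := ("?a?", 1, -1)

def Spec_get_arrangements_py (record : String) (count : Int) (last_replaced : Int) (out : List String) : Prop := out = get_arrangements_py_alt record count last_replaced
instance (record : String) (count : Int) (last_replaced : Int) (out : List String) : Decidable (Spec_get_arrangements_py record count last_replaced out) := by unfold Spec_get_arrangements_py; infer_instance

-- ===== CLAIM (what is proved, stated in full; the proofs are below) =====
def Claim_equal_get_arrangements_py : Prop := ∀ (record : String) (count : Int) (last_replaced : Int), Dom_get_arrangements_py record count last_replaced → Pre_get_arrangements_py record count last_replaced → Spec_get_arrangements_py record count last_replaced (get_arrangements_py record count last_replaced)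


-- ===== LEMMAS AND PROOFS =====

theorem pvSetHash_eq_set (l : List Char) (i : Nat) (h : i < l.length) :
    pvSetHash l (i : Int) = l.set i '#' := by
  have hcast : ((i : Int) + 1) = ((i + 1 : Nat) : Int) := by push_cast; ring
  rw [pvSetHash, PySem.List.slice_to_natCast, hcast, PySem.List.slice_from_natCast,
    List.set_eq_take_cons_drop _ h]
  simp

theorem pvQs_mem (l : List Char) (last : Int) (i : Nat) :
    i ∈ pvQs l last ↔ i < l.length ∧ l.getD i ' ' = '?' ∧ last < (i : Int) := by
  simp [pvQs, List.mem_filter, List.mem_range]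

theorem pvQs_pairwise (l : List Char) (last : Int) : (pvQs l last).Pairwise (· < ·) := by
  exact List.Pairwise.filter _ List.pairwise_lt_range

theorem pvQs_set (l : List Char) (i : Nat) (h : i < l.length) :
    pvQs (l.set i '#') (i : Int) = pvQs l (i : Int) := by
  unfold pvQs
  rw [List.length_set]
  apply List.filter_congr
  intro j hj
  by_cases hij : j = i
  · subst hij; simp
  · have : (l.set i '#').getD j ' ' = l.getD j ' ' := by
      rw [List.getD_eq_getElem?_getD, List.getD_eq_getElem?_getD,
        List.getElem?_set_ne (by omega)]
    rw [this]

theorem pvQs_filter (l : List Char) (last : Int) (i : Nat) (h : last ≤ (i : Int)) :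
    (pvQs l last).filter (fun j => decide (i < j)) = pvQs l (i : Int) := by
  unfold pvQs
  rw [List.filter_filter]
  apply List.filter_congr
  intro j _
  by_cases hij : i < j
  · have h1 : last < (j : Int) := by omega
    have h2 : (i : Int) < (j : Int) := by exact_mod_cast hij
    simp [hij, h1, h2]
  · have h2 : ¬ ((i : Int) < (j : Int)) := by exact_mod_cast hij
    simp [hij, h2]

theorem pvCombos_mem (n : Nat) (qs : List Nat) (c : List Nat) (hc : c ∈ pvCombos n qs) :
    ∀ x ∈ c, x ∈ qs := by
  induction qs generalizing n c with
  | nil =>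
    cases n with
    | zero => simp [pvCombos] at hc; simp [hc]
    | succ n => simp [pvCombos] at hc
  | cons y ys ih =>
    cases n with
    | zero => simp [pvCombos] at hc; simp [hc]
    | succ n =>
      rw [pvCombos, List.mem_append] at hc
      rcases hc with hc | hc
      · rcases List.mem_map.1 hc with ⟨c', hc', rfl⟩
        intro x hx
        rcases List.mem_cons.1 hx with rfl | hx
        · exact List.mem_cons_self
        · exact List.mem_cons_of_mem _ (ih n c' hc' x hx)
      · intro x hx
        exact List.mem_cons_of_mem _ (ih (n + 1) c hc x hx)

theorem pvCombos_flat (n : Nat) (qs : List Nat) (hq : qs.Pairwise (· < ·)) :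
    pvCombos (n + 1) qs
      = qs.flatMap (fun x => (pvCombos n (qs.filter (fun j => decide (x < j)))).map (fun c => x :: c)) := by
  induction qs with
  | nil => simp [pvCombos]
  | cons y ys ih =>
    rcases List.pairwise_cons.1 hq with ⟨hy, hys⟩
    have h1 : (y :: ys).filter (fun j => decide (y < j)) = ys := by
      rw [List.filter_cons]
      simp only [decide_eq_true_eq, lt_self_iff_false, if_false]
      exact List.filter_eq_self.2 (fun j hj => by simpa using hy j hj)
    have h2 : ys.flatMap (fun x => (pvCombos n ((y :: ys).filter (fun j => decide (x < j)))).map (fun c => x :: c))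
        = ys.flatMap (fun x => (pvCombos n (ys.filter (fun j => decide (x < j)))).map (fun c => x :: c)) := by
      apply List.flatMap_congr
      intro x hx
      have hxy : ¬ (x < y) := by have := hy x hx; omega
      rw [List.filter_cons]
      simp [hxy]
    rw [pvCombos, List.flatMap_cons, h1, h2, ih hys]

theorem pvBuild_nil (l : List Char) : pvBuild l [] = l.map pvDot := by
  apply List.ext_getElem
  · simp [pvBuild]
  · intro k h1 h2
    simp [pvBuild, List.getElem_mapIdx, pvDot]

theorem pvBuild_set (l : List Char) (i : Nat) (combo : List Nat) (h : i < l.length)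
    (hc : ∀ j ∈ combo, i < j) :
    pvBuild (l.set i '#') combo = pvBuild l (i :: combo) := by
  apply List.ext_getElem
  · simp [pvBuild]
  · intro k h1 h2
    simp only [pvBuild, List.getElem_mapIdx]
    by_cases hk : k = i
    · subst hk
      have hkc : k ∉ combo := fun hmem => absurd (hc k hmem) (by omega)
      simp [hkc, List.getElem_set_self]
    · rw [List.getElem_set_ne (by omega)]
      simp [List.mem_cons, hk]

theorem pvFoldl_extend_if {α β : Type} (xs : List α) (acc : List β) (p : α → Bool) (g : α → List β) :
    xs.foldl (fun acc x => if p x then acc ++ g x else acc) acc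
      = acc ++ (xs.filter p).flatMap g := by
  induction xs generalizing acc with
  | nil => simp
  | cons x xs ih =>
    by_cases h : p x <;> simp [h, ih, List.append_assoc]

theorem pvRange_filter (l : List Char) (last : Int) (h : -1 ≤ last) :
    (PySem.List.pyRange (last + 1) (l.length : Int) 1).filter
        (fun i => PySem.List.pyGet? l i == some '?')
      = List.map (fun (n : Nat) => (n : Int)) (pvQs l last) := by
  have hmem : ∀ x : Int,
      x ∈ (PySem.List.pyRange (last + 1) (l.length : Int) 1).filter
          (fun i => PySem.List.pyGet? l i == some '?')
        ↔ x ∈ List.map (fun (n : Nat) => (n : Int)) (pvQs l last) := by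
    intro x
    rw [List.mem_filter, PySem.List.mem_pyRange_one, List.mem_map]
    constructor
    · rintro ⟨⟨hlo, hhi⟩, hget⟩
      have hxcast : ((x.toNat : Nat) : Int) = x := by omega
      rw [← hxcast, PySem.List.pyGet?_natCast, beq_iff_eq, List.getElem?_eq_some_iff] at hget
      rcases hget with ⟨hlt, hval⟩
      refine ⟨x.toNat, (pvQs_mem l last x.toNat).2 ⟨hlt, ?_, by omega⟩, by omega⟩
      rw [List.getD_eq_getElem?_getD, List.getElem?_eq_getElem hlt, hval]
      rfl
    · rintro ⟨n, hn, rfl⟩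
      rw [pvQs_mem] at hn
      rcases hn with ⟨hlt, hval, hgt⟩
      refine ⟨⟨by omega, by omega⟩, ?_⟩
      rw [PySem.List.pyGet?_natCast, beq_iff_eq, List.getElem?_eq_some_iff]
      refine ⟨hlt, ?_⟩
      rw [List.getD_eq_getElem?_getD, List.getElem?_eq_getElem hlt] at hval
      exact hval
  have hn1 : ((PySem.List.pyRange (last + 1) (l.length : Int) 1).filter
      (fun i => PySem.List.pyGet? l i == some '?')).Nodup :=
    (PySem.List.nodup_pyRange_one _ _).filter _
  have hn2 : (List.map (fun (n : Nat) => (n : Int)) (pvQs l last)).Nodup :=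
    List.Nodup.map (fun a b hab => by exact_mod_cast hab)
      ((pvQs_pairwise l last).imp (fun hab => by omega))
  exact List.Perm.eq_of_pairwise (fun a b _ _ h1 h2 => by omega)
    ((PySem.List.pairwise_lt_pyRange_one _ _).filter _)
    (List.pairwise_map.mpr ((pvQs_pairwise l last).imp (fun hab => by exact_mod_cast hab)))
    ((List.perm_ext_iff_of_nodup hn1 hn2).mpr hmem)

theorem pvAGo_eq (fuel : Nat) (l : List Char) (count last : Int)
    (hf : l.count '?' < fuel) (hl : -1 ≤ last) :
    pvAGo fuel l count last
      = if count < 0 then []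
        else (pvCombos count.toNat (pvQs l last)).map (pvBuild l) := by
  induction fuel generalizing l count last with
  | zero => exact absurd hf (Nat.not_lt_zero _)
  | succ fuel ih =>
    by_cases h0 : count = 0
    · subst h0
      simp [pvAGo, pvCombos, pvBuild_nil]
    · rw [pvAGo, if_neg h0, pvFoldl_extend_if, List.nil_append, pvRange_filter l last hl,
        List.flatMap_map]
      have hstep : ∀ n ∈ pvQs l last,
          pvAGo fuel (pvSetHash l (n : Int)) (count - 1) (n : Int)
            = if count - 1 < 0 then []
              else (pvCombos (count - 1).toNat (pvQs l (n : Int))).map (fun c => pvBuild l (n :: c)) := by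
        intro n hn
        rw [pvQs_mem] at hn
        rcases hn with ⟨hlt, hval, hgt⟩
        have hval' : l[n] = '?' := by
          rw [List.getD_eq_getElem?_getD, List.getElem?_eq_getElem hlt] at hval
          exact hval
        have hcount : (l.set n '#').count '?' + 1 = l.count '?' := by
          rw [List.set_eq_take_cons_drop _ hlt]
          conv_rhs => rw [← List.take_append_drop n l, List.drop_eq_getElem_cons hlt]
          simp [List.count_append, hval']
          omega
        rw [pvSetHash_eq_set l n hlt,
          ih (l.set n '#') (count - 1) (n : Int) (by omega) (by omega),
          pvQs_set l n hlt]
        split_ifs with hneg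
        · rfl
        · apply List.map_congr_left
          intro c hc
          exact pvBuild_set l n c hlt
            (fun j hj => by
              have := pvCombos_mem _ _ _ hc j hj
              rw [pvQs_mem] at this
              omega)
      by_cases hneg : count < 0
      · rw [if_pos hneg]
        apply List.flatMap_eq_nil_iff.2
        intro x hx
        rw [hstep x hx, if_pos (by omega)]
      · have hpos : 0 ≤ count := by omega
        rw [if_neg (by omega)]
        have hc1 : count.toNat = (count - 1).toNat + 1 := by omega
        rw [hc1, pvCombos_flat _ _ (pvQs_pairwise l last)]
        rw [List.map_flatMap]
        apply List.flatMap_congr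
        intro x hx
        have hgt : last < (x : Int) := ((pvQs_mem l last x).1 hx).2.2
        rw [hstep x hx, if_neg (by omega), pvQs_filter l last x (by omega)]
        rw [List.map_map]
        rfl

theorem get_arrangements_py_spec : Claim_equal_get_arrangements_py := by
  intro record count last _ hpre
  unfold Spec_get_arrangements_py get_arrangements_py get_arrangements_py_alt
  by_cases h0 : count = 0
  · subst h0
    simp [pvAGo, pvCombos, pvBuild_nil]
  · rcases hpre with hl | hc
    · have hf : record.toList.count '?' < record.toList.length + 1 :=
        Nat.lt_succ_of_le (List.count_le_length)
      rw [pvAGo_eq _ _ _ _ hf hl]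
      split_ifs with hneg
      · simp
      · rw [List.map_map]
        rfl
    · exact absurd hc h0
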